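-- pv_equiv track=rewrite | github.com/DrGregDoyle/BitClone | src/encoder_lib.py | target_to_bits
-- ===== SOURCE A (Python) =====
-- def target_to_bits(hex_target: str):
--     """
--     Given a 64-character target string we return the corresponding exponent (bit shift) as 2-char hex string (1-byte)
--     """
--     # Find significant byte
--     byte = 0
--     while True:
--         temp_bit = hex_target[byte:byte + 2]
--         if temp_bit != "00":
--             break
--         byte += 2
--
--     # Get coeff
--     coeff = hex_target[byte:]
--
--     # -- Formatting -- #
--     exp = format(32 - byte // 2, "02x")
--     coeff = coeff[:6]
--     return exp + coeff
-- ===== SOURCE B (Python) =====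
-- def target_to_bits(hex_target: str):
--     # Binary search for the largest k such that the first 2k chars are all '0'
--     # (the property "prefix of 2k zeros" is monotone in k), instead of a linear scan.
--     lo, hi = 0, len(hex_target) // 2
--     while lo < hi:
--         mid = (lo + hi + 1) // 2
--         if hex_target[:2 * mid] == "0" * (2 * mid):
--             lo = mid
--         else:
--             hi = mid - 1
--     byte = 2 * lo
--     return format(32 - lo, "02x") + hex_target[byte:byte + 6]
-- ===== Notes on version B (the rewrite author's own statement) =====
-- stated objective: alternative
-- what changed: Replaced A's linear while-loop over successive 2-char chunks by a binary search over the number of leading zero byte-pairs, exploiting monotonicity of the all-zero-prefix property.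
import Mathlib
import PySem

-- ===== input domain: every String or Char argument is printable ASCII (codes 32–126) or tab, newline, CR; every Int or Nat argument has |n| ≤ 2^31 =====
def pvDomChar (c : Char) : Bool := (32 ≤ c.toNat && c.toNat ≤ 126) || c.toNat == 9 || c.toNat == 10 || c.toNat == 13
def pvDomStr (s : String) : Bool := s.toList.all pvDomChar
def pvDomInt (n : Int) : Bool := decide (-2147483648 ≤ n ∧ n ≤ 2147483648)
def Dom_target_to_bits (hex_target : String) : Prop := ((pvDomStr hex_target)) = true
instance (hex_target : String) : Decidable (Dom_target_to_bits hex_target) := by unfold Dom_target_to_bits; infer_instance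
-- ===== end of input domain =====

-- B replaces A's linear while-loop over successive 2-char chunks by a binary search over the number of
-- leading zero byte-pairs (the all-zero-prefix property is monotone); objective: alternative algorithm.

-- shared helper: format(n, "02x") — lowercase hex of |n|, '-' sign, zero-padded to width 2
def pvHexDigit (n : Nat) : Char := if n < 10 then Char.ofNat (48 + n) else Char.ofNat (87 + n)

def pvHexRev : Nat → List Char
  | 0 => []
  | n + 1 => pvHexDigit ((n + 1) % 16) :: pvHexRev ((n + 1) / 16)
decreasing_by exact Nat.div_lt_self (Nat.succ_pos n) (by norm_num)

def pvFmt02x (n : Int) : String :=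
  let mag : String := if n.natAbs = 0 then "0" else String.ofList (pvHexRev n.natAbs).reverse
  PySem.Str.zfill (if n < 0 then "-" ++ mag else mag) 2

-- ===== PORT A =====
-- the while-loop: byte := 0; while hex_target[byte:byte+2] == "00": byte += 2
-- (slice with byte ≥ 0 is exactly (drop byte).take 2)
def pvFindByte (s : List Char) (byte : Nat) : Nat :=
  -- temp_bit = hex_target[byte : byte + 2]
  if String.ofList ((s.drop byte).take 2) ≠ "00" then byte else pvFindByte s (byte + 2)
termination_by s.length - byte
decreasing_by
  rename_i h
  simp only [ne_eq, Decidable.not_not] at h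
  have hlen : ((s.drop byte).take 2).length = 2 := by
    have h2 := congrArg (fun t : String => t.toList.length) h
    simpa using h2
  have : byte + 2 ≤ s.length := by
    simp [List.length_take, List.length_drop] at hlen; omega
  omega

def target_to_bits (hex_target : String) : String :=
  let s := hex_target.toList
  let byte := pvFindByte s 0
  let coeff := s.drop byte
  let exp := pvFmt02x (32 - PySem.Int.floordiv (byte : Int) 2)
  exp ++ String.ofList (coeff.take 6)

-- ===== PORT B =====
-- while lo < hi: mid = (lo+hi+1)//2; if hex_target[:2*mid] == "0"*(2*mid): lo = mid else hi = mid-1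
def pvBSearch (s : List Char) (lo hi : Nat) : Nat :=
  if lo < hi then
    let mid := (lo + hi + 1) / 2
    if String.ofList (s.take (2 * mid)) = String.ofList (List.replicate (2 * mid) '0')
    then pvBSearch s mid hi
    else pvBSearch s lo (mid - 1)
  else lo
termination_by hi - lo
decreasing_by all_goals omega

def target_to_bits_alt (hex_target : String) : String :=
  let s := hex_target.toList
  let lo := pvBSearch s 0 (s.length / 2)
  let byte := 2 * lo
  pvFmt02x (32 - (lo : Int)) ++ String.ofList ((s.drop byte).take 6)

-- ===== PRECONDITION & SPEC =====
def Spec_target_to_bits (hex_target : String) (out : String) : Prop := out = target_to_bits_alt hex_target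
instance (hex_target : String) (out : String) : Decidable (Spec_target_to_bits hex_target out) := by unfold Spec_target_to_bits; infer_instance

-- ===== CLAIM (what is proved, stated in full; the proofs are below) =====
def Claim_equal_target_to_bits : Prop := ∀ (hex_target : String), Dom_target_to_bits hex_target → Spec_target_to_bits hex_target (target_to_bits hex_target)

-- ===== LEMMAS AND PROOFS =====

-- A's loop index only shifts: scanning (a :: b :: t) from index n+2 is scanning t from n
theorem pvFindByte_shift (k : Nat) : ∀ (a b : Char) (t : List Char) (n : Nat),
    t.length - n ≤ k → pvFindByte (a :: b :: t) (n + 2) = pvFindByte t n + 2 := by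
  induction k with
  | zero =>
    intro a b t n h
    have hd : t.drop n = [] := List.drop_eq_nil_of_le (by omega)
    have hdrop : (a :: b :: t).drop (n + 2) = t.drop n := by
      simp [List.drop_succ_cons]
    conv_lhs => rw [pvFindByte]
    conv_rhs => rw [pvFindByte]
    rw [hdrop, hd]
    simp
  | succ k ih =>
    intro a b t n h
    have hdrop : (a :: b :: t).drop (n + 2) = t.drop n := by
      simp [List.drop_succ_cons]
    conv_lhs => rw [pvFindByte]
    conv_rhs => rw [pvFindByte]
    rw [hdrop]
    by_cases hc : String.ofList ((t.drop n).take 2) = "00"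
    · simp only [hc, ne_eq, not_true_eq_false, if_false]
      have hlen : ((t.drop n).take 2).length = 2 := by
        have h2 := congrArg (fun u : String => u.toList.length) hc
        simpa using h2
      have hn2 : n + 2 ≤ t.length := by
        simp [List.length_take, List.length_drop] at hlen; omega
      exact ih a b t (n + 2) (by omega)
    · simp [hc]

-- characterisation of A's loop: it stops at the zero-run length floored to an even index
theorem pvFindByte_fuel (k : Nat) : ∀ (s : List Char), s.length ≤ k →
    pvFindByte s 0 = (s.takeWhile (· == '0')).length - (s.takeWhile (· == '0')).length % 2 := by
  induction k with
  | zero =>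
    intro s h
    have : s = [] := List.eq_nil_of_length_eq_zero (by omega)
    subst this
    rw [pvFindByte]; simp
  | succ k ih =>
    intro s h
    rw [pvFindByte]
    simp only [List.drop_zero]
    by_cases hc : String.ofList (s.take 2) = "00"
    · have ht2 : s.take 2 = ['0', '0'] := by
        have h2 := congrArg String.toList hc
        simpa using h2
      cases s with
      | nil => simp at ht2
      | cons a s' =>
        cases s' with
        | nil => simp at ht2
        | cons b t =>
          have hab : a = '0' ∧ b = '0' := by simpa using ht2
          obtain ⟨ha, hb⟩ := hab
          subst ha; subst hb
          simp only [hc, ne_eq, not_true_eq_false, if_false]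
          have hsh := pvFindByte_shift (k := t.length) '0' '0' t 0 (by omega)
          have hml : t.length ≤ k := by simp at h; omega
          have hih := ih t hml
          have htw : (('0' :: '0' :: t).takeWhile (· == '0'))
              = '0' :: '0' :: t.takeWhile (· == '0') := by
            simp
          rw [htw]
          have h2 : pvFindByte ('0' :: '0' :: t) 2 = pvFindByte t 0 + 2 := by simpa using hsh
          rw [h2, hih]
          have hle : (t.takeWhile (· == '0')).length ≤ t.length :=
            (List.takeWhile_sublist _).length_le
          simp [List.length_cons]
          omega
    · simp only [hc, ne_eq, not_false_eq_true, if_true]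
      match s with
      | [] => simp
      | [a] =>
        have : ([a].takeWhile (· == '0')).length ≤ 1 :=
          (List.takeWhile_sublist _).length_le
        omega
      | a :: b :: t =>
        by_cases ha : a = '0'
        · subst ha
          have hb : ¬ (b = '0') := by
            intro hb; subst hb; simp at hc
          have htw : ((('0' : Char) :: b :: t).takeWhile (· == '0')) = ['0'] := by
            simp [hb]
          rw [htw]
          simp
        · have htw : ((a :: b :: t).takeWhile (· == '0')) = [] := by
            simp [ha]
          rw [htw]
          simp

theorem pvFindByte_eq (s : List Char) :
    pvFindByte s 0 = (s.takeWhile (· == '0')).length - (s.takeWhile (· == '0')).length % 2 :=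
  pvFindByte_fuel s.length s le_rfl

-- B's probe: the prefix of length m is all '0' iff m ≤ zero-run length
theorem take_eq_replicate_iff (s : List Char) : ∀ (m : Nat),
    s.take m = List.replicate m '0' ↔ m ≤ (s.takeWhile (· == '0')).length := by
  induction s with
  | nil =>
    intro m
    constructor
    · intro h
      have := congrArg List.length h
      simp at this
      omega
    · intro h; simp at h; simp [h]
  | cons a t ih =>
    intro m
    cases m with
    | zero => simp
    | succ m =>
      rw [List.take_succ_cons, List.replicate_succ]
      constructor
      · intro h
        have ha : a = '0' ∧ t.take m = List.replicate m '0' := by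
          constructor <;> [exact (List.cons.injEq _ _ _ _ ▸ h).1;
            exact (List.cons.injEq _ _ _ _ ▸ h).2]
        obtain ⟨ha0, ht⟩ := ha
        subst ha0
        have := (ih m).mp ht
        simp only [List.takeWhile_cons]
        simp
        omega
      · intro h
        by_cases ha : a = '0'
        · subst ha
          simp only [List.takeWhile_cons] at h
          simp at h
          have := (ih m).mpr (by omega)
          simp [this]
        · exfalso
          have htw : ((a :: t).takeWhile (· == '0')) = [] := by simp [ha]
          rw [htw] at h
          simp at h
  
-- B's binary search converges to z / 2 whenever z / 2 lies in [lo, hi]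
theorem pvBSearch_fuel (s : List Char) (k : Nat) : ∀ (lo hi : Nat),
    hi - lo ≤ k → lo ≤ (s.takeWhile (· == '0')).length / 2 →
    (s.takeWhile (· == '0')).length / 2 ≤ hi →
    pvBSearch s lo hi = (s.takeWhile (· == '0')).length / 2 := by
  induction k with
  | zero =>
    intro lo hi h h1 h2
    rw [pvBSearch]
    have : ¬ lo < hi := by omega
    simp [this]
    omega
  | succ k ih =>
    intro lo hi h h1 h2
    rw [pvBSearch]
    by_cases hlt : lo < hi
    · simp only [hlt, if_true]
      set z := (s.takeWhile (· == '0')).length with hz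
      set mid := (lo + hi + 1) / 2 with hmid
      have hmlo : lo + 1 ≤ mid := by omega
      have hmhi : mid ≤ hi := by omega
      have hcond : (String.ofList (s.take (2 * mid)) = String.ofList (List.replicate (2 * mid) '0'))
          ↔ 2 * mid ≤ z := by
        rw [show (String.ofList (s.take (2 * mid)) = String.ofList (List.replicate (2 * mid) '0'))
              ↔ s.take (2 * mid) = List.replicate (2 * mid) '0' from
            ⟨fun h => by
              have := congrArg String.toList h
              simpa using this, fun h => by rw [h]⟩]
        exact take_eq_replicate_iff s (2 * mid)
      by_cases hc : 2 * mid ≤ z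
      · rw [if_pos (hcond.mpr hc)]
        exact ih mid hi (by omega) (by omega) h2
      · rw [if_neg (fun hh => hc (hcond.mp hh))]
        exact ih lo (mid - 1) (by omega) h1 (by omega)
    · simp [hlt]
      omega

-- ===== VERDICT (by name: the statement is the Claim_ definition above) =====
theorem target_to_bits_spec : Claim_equal_target_to_bits := by
  intro hex_target _
  unfold Spec_target_to_bits target_to_bits target_to_bits_alt
  set s := hex_target.toList with hs
  set z := (s.takeWhile (· == '0')).length with hz
  have hzlen : z ≤ s.length := (List.takeWhile_sublist _).length_le
  have hA : pvFindByte s 0 = z - z % 2 := pvFindByte_eq s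
  have hB : pvBSearch s 0 (s.length / 2) = z / 2 :=
    pvBSearch_fuel s (s.length / 2) 0 (s.length / 2) (by omega) (by omega) (by omega)
  have hbyte : z - z % 2 = 2 * (z / 2) := by omega
  have hfd : PySem.Int.floordiv ((2 * (z / 2) : Nat) : Int) 2 = ((z / 2 : Nat) : Int) := by
    rw [show (2 : Int) = ((2 : Nat) : Int) from rfl]
    rw [PySem.Int.floordiv_natCast]
    congr 1
    omega
  simp only [hA, hB, hbyte, hfd]
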